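-- pv_equiv track=rewrite | github.com/uddaniiii/coding-test | 프로그래머스/0/120886. A로 B 만들기/A로 B 만들기.py | solution
-- ===== SOURCE A (Python) =====
-- def solution(before, after):
--     before=list(before)
--     for a in after:
--         if a in before:
--             before.remove(a)
--         else:
--             return 0
--     return 1
-- ===== SOURCE B (Python) =====
-- def solution(before, after):
--     need = {}
--     for c in after:
--         need[c] = need.get(c, 0) + 1
--     have = {}
--     for c in before:
--         have[c] = have.get(c, 0) + 1
--     return 1 if all(have.get(c, 0) >= n for c, n in need.items()) else 0
-- ===== Notes on version B (the rewrite author's own statement) =====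
-- stated objective: faster
-- what changed: Replaces A's per-character membership scan and first-occurrence removal from a shrinking list by two hash-map character counters built in one pass each, comparing counts per distinct character.
import Mathlib
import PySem

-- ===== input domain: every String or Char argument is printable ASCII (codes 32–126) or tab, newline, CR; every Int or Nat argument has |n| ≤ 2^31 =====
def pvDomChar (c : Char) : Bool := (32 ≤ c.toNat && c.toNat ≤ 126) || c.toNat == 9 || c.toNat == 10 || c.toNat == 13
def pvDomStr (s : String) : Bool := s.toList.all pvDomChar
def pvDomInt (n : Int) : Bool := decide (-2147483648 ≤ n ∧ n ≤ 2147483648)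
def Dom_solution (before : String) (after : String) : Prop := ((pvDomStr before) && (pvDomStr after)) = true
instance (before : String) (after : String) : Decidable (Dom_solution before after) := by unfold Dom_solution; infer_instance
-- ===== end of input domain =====

-- B replaces A's scan-and-remove loop by two one-pass character counters compared per distinct character (asymptotically faster).

-- ===== PORT A =====
-- the for-loop over `after`, carrying the mutable list `before`
def solLoopA : List Char → List Char → Int
  | [], _ => 1
  | a :: t, bef =>
    if a ∈ bef then solLoopA t ((PySem.List.remove? bef a).getD bef)
    else 0

def solution (before : String) (after : String) : Int :=
  solLoopA after.toList before.toList

-- ===== PORT B =====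
def solution_alt (before : String) (after : String) : Int :=
  let need := after.toList.foldl (fun d c => d.insert c (d.getD c 0 + 1)) (PySem.Dict.empty : PySem.Dict Char Int)
  let haveD := before.toList.foldl (fun d c => d.insert c (d.getD c 0 + 1)) (PySem.Dict.empty : PySem.Dict Char Int)
  if need.items.all (fun p => decide (p.2 ≤ haveD.getD p.1 0)) then 1 else 0

-- ===== PRECONDITION & SPEC =====
def Spec_solution (before : String) (after : String) (out : Int) : Prop := out = solution_alt before after
instance (before : String) (after : String) (out : Int) : Decidable (Spec_solution before after out) := by unfold Spec_solution; infer_instance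

-- ===== CLAIM (what is proved, stated in full; the proofs are below) =====
def Claim_equal_solution : Prop := ∀ (before : String) (after : String), Dom_solution before after → Spec_solution before after (solution before after)

-- ===== LEMMAS AND PROOFS =====

-- counting characterisation of A's loop: it returns 1 iff the remaining suffix is a sub-multiset of the remaining pool
lemma solLoopA_eq (rest bef : List Char) :
    solLoopA rest bef = if ∀ c ∈ rest, rest.count c ≤ bef.count c then 1 else 0 := by
  induction rest generalizing bef with
  | nil => simp [solLoopA]
  | cons a t ih =>
    by_cases ha : a ∈ bef
    · rw [solLoopA, if_pos ha, PySem.List.remove?_eq_some_erase bef a ha, Option.getD_some, ih]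
      apply if_congr _ rfl rfl
      have key : (∀ c ∈ t, t.count c ≤ (bef.erase a).count c) ↔
          (∀ c ∈ a :: t, (a :: t).count c ≤ bef.count c) := by
        constructor
        · intro h c hc
          have hb : 1 ≤ bef.count a := List.one_le_count_iff.mpr ha
          rcases List.mem_cons.mp hc with hca | hct
          · subst hca
            rw [List.count_cons_self]
            by_cases hct : c ∈ t
            · have := h c hct
              rw [List.count_erase_self] at this
              omega
            · rw [List.count_eq_zero_of_not_mem hct]; omega
          · by_cases hca : c = a
            · subst hca
              rw [List.count_cons_self]
              have := h c hct
              rw [List.count_erase_self] at this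
              omega
            · rw [List.count_cons_of_ne (Ne.symm hca)]
              have := h c hct
              rw [List.count_erase_of_ne hca] at this
              omega
        · intro h c hc
          by_cases hca : c = a
          · subst hca
            have := h c (List.mem_cons_self ..)
            rw [List.count_cons_self] at this
            rw [List.count_erase_self]
            omega
          · have := h c (List.mem_cons_of_mem _ hc)
            rw [List.count_cons_of_ne (Ne.symm hca)] at this
            rw [List.count_erase_of_ne hca]
            omega
      exact key
    · rw [solLoopA, if_neg ha]
      rw [if_neg]
      intro h
      have := h a (List.mem_cons_self ..)
      rw [List.count_cons_self] at this
      have : a ∈ bef := List.one_le_count_iff.mp (by omega)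
      exact ha this
-- counting characterisation of B
lemma solution_alt_eq (before after : String) :
    solution_alt before after =
      if ∀ c ∈ after.toList, after.toList.count c ≤ before.toList.count c then 1 else 0 := by
  unfold solution_alt
  rw [PySem.Dict.foldl_insert_getD_add_one_eq_counter]
  apply if_congr _ rfl rfl
  rw [List.all_eq_true]
  rw [PySem.Dict.items_counter]
  constructor
  · intro h c hc
    have := h (c, (after.toList.count c : Int))
      (List.mem_map.mpr ⟨c, (PySem.Set.mem_ofList _ _).mpr hc, rfl⟩)
    simp only [decide_eq_true_eq, PySem.Dict.getD_foldl_insert_add_one,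
      PySem.Dict.getD_empty] at this
    omega
  · intro h p hp
    rcases List.mem_map.mp hp with ⟨c, hc, rfl⟩
    simp only [decide_eq_true_eq, PySem.Dict.getD_foldl_insert_add_one,
      PySem.Dict.getD_empty]
    have := h c ((PySem.Set.mem_ofList _ _).mp hc)
    omega

-- ===== VERDICT (by name: the statement is the Claim_ definition above) =====
theorem solution_spec : Claim_equal_solution := by
  intro before after _
  unfold Spec_solution solution
  rw [solLoopA_eq, solution_alt_eq]
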